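-- pv_equiv track=rewrite | github.com/Voyager1744/contest | YoungCon 2024/B.py | min_energy_cost
-- ===== SOURCE A (Python) =====
-- def min_energy_cost(n, k, a):
--     # Создаем список кортежей (значение, индекс)
--     indexed_a = sorted((val, idx) for idx, val in enumerate(a))
--
--     # Инициализируем массив результатов
--     result = [0] * n
--
--     # Префиксные суммы для значений в отсортированном массиве
--     prefix_sums = [0] * (n + 1)
--     for i in range(1, n + 1):
--         prefix_sums[i] = prefix_sums[i - 1] + indexed_a[i - 1][0]
--
--     # Функция для нахождения минимальных энергозатрат
--     def find_min_cost_for_index(i):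
--         original_value = a[i]
--         pos = next(idx for idx, val in enumerate(indexed_a) if val[1] == i)
--
--         # Определение k ближайших соседей
--         left = pos - 1
--         right = pos + 1
--         selected = []
--
--         while len(selected) < k:
--             if left >= 0 and (right >= n or abs(indexed_a[left][0] - original_value) <= abs(
--                     indexed_a[right][0] - original_value)):
--                 if indexed_a[left][1] != i:
--                     selected.append(indexed_a[left][0])
--                 left -= 1
--             else:
--                 if right < n and indexed_a[right][1] != i:
--                     selected.append(indexed_a[right][0])
--                 right += 1
--
--         # Вычисление энергозатрат
--         min_cost = sum(abs(original_value - val) for val in selected)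
--         return min_cost
--
--     # Вычисление результата для каждого индекса
--     for i in range(n):
--         result[i] = find_min_cost_for_index(i)
--
--     return result
-- ===== SOURCE B (Python) =====
-- def min_energy_cost(n, k, a):
--     # Simpler: per index, sort the absolute differences to all other elements
--     # and sum the k smallest (ties in distance contribute the same amount either way).
--     result = []
--     for i in range(n):
--         dists = sorted(abs(a[i] - a[j]) for j in range(n) if j != i)
--         result.append(sum(dists[:k]))
--     return result
-- ===== Notes on version B (the rewrite author's own statement) =====
-- stated objective: simpler
-- what changed: A sorts (value,index) pairs, locates each index by a linear scan and runs a two-pointer greedy walk outward from that position; B drops all of that and, per index, just sorts the absolute differences to the other elements and sums the k smallest (ties in distance contribute the same amount, so the greedy choice is irrelevant to the sum).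
-- outside the precondition, e.g. on min_energy_cost(2, 1, [5, 1, 3]): A returns [2, 2], B returns [4, 4]; on min_energy_cost(3, -1, [1, 2, 3]): A returns [0, 0, 0], B returns [1, 1, 1]
import Mathlib
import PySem

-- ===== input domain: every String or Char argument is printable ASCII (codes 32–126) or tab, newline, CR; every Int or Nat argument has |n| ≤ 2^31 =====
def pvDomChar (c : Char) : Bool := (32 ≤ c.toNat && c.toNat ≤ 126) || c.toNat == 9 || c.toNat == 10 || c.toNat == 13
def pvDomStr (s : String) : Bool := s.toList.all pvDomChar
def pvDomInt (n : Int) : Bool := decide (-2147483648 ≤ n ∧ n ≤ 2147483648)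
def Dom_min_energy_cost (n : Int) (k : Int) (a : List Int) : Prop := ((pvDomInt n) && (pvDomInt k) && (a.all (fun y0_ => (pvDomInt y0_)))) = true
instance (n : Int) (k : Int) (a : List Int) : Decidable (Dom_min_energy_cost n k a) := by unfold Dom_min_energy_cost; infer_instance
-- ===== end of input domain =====

-- B replaces A's sort-pairs + per-index scan + two-pointer greedy by a plain
-- "sort the distances, sum the k smallest" per index: simpler, not faster.
-- Pre_ restricts to the natural domain: n = len(a) (a mismatched n makes A raise or
-- read elements past n accidentally) and 0 <= k (a negative neighbour count is
-- meaningless; A returns all zeros there, B's negative slice reads differently)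
-- and k <= n-1 for n > 0 (for k >= n > 0 A's while loop never terminates).


-- ===== PORT A =====
-- the while-loop of find_min_cost_for_index; fuel = k.toNat + 1 (inside Pre_ every
-- iteration appends one element, so this fuel is never exhausted)
def mecLoop (k n i x : Int) (indexed : List (Int × Int)) :
    Nat → Int → Int → List Int → List Int
  | 0, _, _, selected => selected
  | fuel + 1, left, right, selected =>
    if (selected.length : Int) < k then
      if 0 ≤ left ∧ (n ≤ right ∨
          |(PySem.List.pyGetD indexed left (0, 0)).1 - x| ≤
          |(PySem.List.pyGetD indexed right (0, 0)).1 - x|) then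
        mecLoop k n i x indexed fuel (left - 1) right
          (if (PySem.List.pyGetD indexed left (0, 0)).2 ≠ i then
            selected ++ [(PySem.List.pyGetD indexed left (0, 0)).1] else selected)
      else
        mecLoop k n i x indexed fuel left (right + 1)
          (if right < n ∧ (PySem.List.pyGetD indexed right (0, 0)).2 ≠ i then
            selected ++ [(PySem.List.pyGetD indexed right (0, 0)).1] else selected)
    else selected

def min_energy_cost (n : Int) (k : Int) (a : List Int) : List Int :=
  let indexed := PySem.List.sorted2
    (a.zipIdx.map (fun p => (p.1, (p.2 : Int)))) (fun p => p.1) (fun p => p.2) false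
  -- prefix_sums is computed by A but never used
  let _prefix_sums := (PySem.List.pyRange 1 (n + 1)).foldl
    (fun ps i => ps ++ [PySem.List.pyGetD ps (i - 1) 0 +
                        (PySem.List.pyGetD indexed (i - 1) (0, 0)).1]) [0]
  (PySem.List.pyRange 0 n).map (fun i =>
    let x := PySem.List.pyGetD a i 0
    let pos := List.findIdx (fun p => p.2 == i) indexed
    let selected := mecLoop k n i x indexed (k.toNat + 1) ((pos : Int) - 1) ((pos : Int) + 1) []
    (selected.map (fun v => |x - v|)).sum)

-- ===== PORT B =====
def min_energy_cost_alt (n : Int) (k : Int) (a : List Int) : List Int :=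
  (PySem.List.pyRange 0 n).map (fun i =>
    let dists := PySem.List.sorted
      (((PySem.List.pyRange 0 n).filter (fun j => j ≠ i)).map
        (fun j => |PySem.List.pyGetD a i 0 - PySem.List.pyGetD a j 0|)) (fun x => x) false
    (PySem.List.slice dists none (some k)).sum)

-- ===== PRECONDITION & SPEC =====
-- Pre_ admits n ≤ 0 (A returns []), k = 0 with n ≤ len(a) (A returns zeros), and the
-- natural domain n = len(a), 0 ≤ k ≤ n-1; it excludes: n > len(a) (A raises IndexError),
-- 0 < n < len(a) with k > 0 (A's answer accidentally uses elements beyond index n),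
-- k < 0 (outside the natural domain: A returns all zeros, B's negative slice differs),
-- and k ≥ n > 0 (A's while loop never terminates).
def Pre_min_energy_cost (n : Int) (k : Int) (a : List Int) : Prop :=
  n ≤ 0 ∨ (k = 0 ∧ n ≤ (a.length : Int)) ∨
    (n = (a.length : Int) ∧ 0 ≤ k ∧ (k < n ∨ n = 0))
instance (n : Int) (k : Int) (a : List Int) : Decidable (Pre_min_energy_cost n k a) := by
  unfold Pre_min_energy_cost; infer_instance

def pvWitness_min_energy_cost : Int × Int × List Int := (4, 2, [3, 1, 7, 2])

def Spec_min_energy_cost (n : Int) (k : Int) (a : List Int) (out : List Int) : Prop := out = min_energy_cost_alt n k a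
instance (n : Int) (k : Int) (a : List Int) (out : List Int) : Decidable (Spec_min_energy_cost n k a out) := by unfold Spec_min_energy_cost; infer_instance

-- ===== CLAIM (what is proved, stated in full; the proofs are below) =====
def Claim_equal_min_energy_cost : Prop := ∀ (n : Int) (k : Int) (a : List Int), Dom_min_energy_cost n k a → Pre_min_energy_cost n k a → Spec_min_energy_cost n k a (min_energy_cost n k a)

-- ===== LEMMAS AND PROOFS =====

def gm : List Int → List Int → Nat → List Int
  | _, _, 0 => []
  | [], [], _ + 1 => []
  | l :: L, [], m + 1 => l :: gm L [] m
  | [], r :: R, m + 1 => r :: gm [] R m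
  | l :: L, r :: R, m + 1 =>
    if l ≤ r then l :: gm L (r :: R) m else r :: gm (l :: L) R m

theorem gm_eq_take_merge (m : Nat) (L R : List Int) :
    gm L R m = (L.merge R (fun a b => decide (a ≤ b))).take m := by
  induction m generalizing L R with
  | zero => simp [gm]
  | succ m ih =>
    match L, R with
    | [], [] => simp [gm]
    | l :: L, [] => simp [gm, List.merge_right, ih]
    | [], r :: R => simp [gm, List.nil_merge, ih]
    | l :: L, r :: R =>
      rw [List.cons_merge_cons]
      by_cases h : l ≤ r
      · simp [gm, h, ih]
      · simp [gm, h, ih]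

theorem pairwise_insertBy {α : Type} (before : α → α → Bool) (R : α → α → Prop)
    (htrans : ∀ a b c, R a b → R b c → R a c)
    (h1 : ∀ a b, before a b = true → R a b)
    (h2 : ∀ a b, before a b = false → R b a)
    (x : α) (ys : List α) (h : ys.Pairwise R) :
    (PySem.List.insertBy before x ys).Pairwise R := by
  induction ys with
  | nil => simp [PySem.List.insertBy]
  | cons y ys ih =>
    rw [List.pairwise_cons] at h
    by_cases hb : before x y = true
    · simp only [PySem.List.insertBy, hb, if_true]
      refine List.Pairwise.cons ?_ (List.Pairwise.cons h.1 h.2)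
      intro z hz
      rcases List.mem_cons.mp hz with rfl | hz
      · exact h1 _ _ hb
      · exact htrans _ _ _ (h1 _ _ hb) (h.1 _ hz)
    · simp only [PySem.List.insertBy, hb]
      refine List.Pairwise.cons ?_ (ih h.2)
      intro z hz
      rcases (PySem.List.mem_insertBy before x z ys).mp hz with rfl | hz
      · exact h2 _ _ (by simpa using hb)
      · exact h.1 _ hz

theorem pairwise_foldl_insertBy {α : Type} (before : α → α → Bool) (R : α → α → Prop)
    (htrans : ∀ a b c, R a b → R b c → R a c)
    (h1 : ∀ a b, before a b = true → R a b)
    (h2 : ∀ a b, before a b = false → R b a)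
    (xs acc : List α) (hacc : acc.Pairwise R) :
    (xs.foldl (fun acc x => PySem.List.insertBy before x acc) acc).Pairwise R := by
  induction xs generalizing acc with
  | nil => simpa using hacc
  | cons x xs ih =>
    exact ih _ (pairwise_insertBy before R htrans h1 h2 x acc hacc)

theorem sorted2_pairwise_fst (xs : List (Int × Int)) :
    (PySem.List.sorted2 xs (fun p => p.1) (fun p => p.2) false).Pairwise
      (fun p q => p.1 ≤ q.1) := by
  have h : (PySem.List.sorted2 xs (fun p => p.1) (fun p => p.2) false).Pairwise
      (fun p q : Int × Int => p.1 < q.1 ∨ (p.1 = q.1 ∧ p.2 ≤ q.2)) := by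
    have : PySem.List.sorted2 xs (fun p => p.1) (fun p => p.2) false =
        xs.foldl (fun acc x => PySem.List.insertBy
          (fun a b : Int × Int => decide (a.1 < b.1) || (!decide (b.1 < a.1) && decide (a.2 < b.2))) x acc) [] := rfl
    rw [this]
    apply pairwise_foldl_insertBy
    · rintro a b c (h1 | ⟨h1, h1'⟩) (h2 | ⟨h2, h2'⟩) <;> [left; left; left; right] <;> omega
    · intro a b h
      simp only [Bool.or_eq_true, decide_eq_true_eq, Bool.and_eq_true, Bool.not_eq_true',
        decide_eq_false_iff_not] at h
      omega
    · intro a b h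
      simp at h
      omega
    · exact List.Pairwise.nil
  exact h.imp (by rintro a b (h | ⟨h, _⟩) <;> omega)

def mecL (x : Int) (s : List (Int × Int)) (pos : Nat) : List Int :=
  ((s.take pos).reverse).map (fun p => x - p.1)

def mecR (x : Int) (s : List (Int × Int)) (pos : Nat) : List Int :=
  (s.drop (pos + 1)).map (fun p => p.1 - x)

theorem length_mecL (x : Int) (s : List (Int × Int)) (pos : Nat) (h : pos ≤ s.length) :
    (mecL x s pos).length = pos := by
  simp [mecL, h]

theorem length_mecR (x : Int) (s : List (Int × Int)) (pos : Nat) :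
    (mecR x s pos).length = s.length - (pos + 1) := by
  simp [mecR]

theorem getElem_mecL (x : Int) (s : List (Int × Int)) (pos d : Nat) (hpos : pos ≤ s.length)
    (hd : d < pos) :
    (mecL x s pos)[d]'(by rw [length_mecL x s pos hpos]; exact hd)
      = x - (s[pos - 1 - d]'(by omega)).1 := by
  have hmin : min pos s.length = pos := Nat.min_eq_left hpos
  simp only [mecL, List.getElem_map, List.getElem_reverse, List.getElem_take,
    List.length_take, hmin]

theorem getElem_mecR (x : Int) (s : List (Int × Int)) (pos d : Nat)
    (hd : d < s.length - (pos + 1)) :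
    (mecR x s pos)[d]'(by rw [length_mecR]; exact hd)
      = (s[pos + 1 + d]'(by omega)).1 - x := by
  simp only [mecR, List.getElem_map, List.getElem_drop]

theorem mecLoop_eq (k n i x : Int) (s : List (Int × Int)) (pos : Nat)
    (hn : (s.length : Int) = n)
    (hpos : pos < s.length)
    (hx1 : (s[pos]'hpos).1 = x)
    (huniq : ∀ j (hj : j < s.length), j ≠ pos → (s[j]'hj).2 ≠ i)
    (hmono : ∀ p q (hp : p < s.length) (hq : q < s.length), p ≤ q → (s[p]'hp).1 ≤ (s[q]'hq).1)
    (hk0 : 0 ≤ k) :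
    ∀ (m dl dr : Nat) (sel : List Int),
      dl ≤ pos → pos + 1 + dr ≤ s.length →
      m + dl + dr + 1 ≤ s.length →
      sel.length + m = k.toNat →
      (mecLoop k n i x s (m+1) ((pos:Int) - 1 - dl) ((pos:Int) + 1 + dr) sel).map (fun v => |x - v|)
        = sel.map (fun v => |x - v|) ++ gm ((mecL x s pos).drop dl) ((mecR x s pos).drop dr) m := by
  intro m
  induction m with
  | zero =>
    intro dl dr sel hdl hdr hrem hsel
    have hk : (k.toNat : Int) = k := Int.toNat_of_nonneg hk0
    have hc : ¬ ((sel.length : Int) < k) := by omega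
    rw [mecLoop, if_neg hc]
    simp [gm]
  | succ m ih =>
    intro dl dr sel hdl hdr hrem hsel
    have hk : (k.toNat : Int) = k := Int.toNat_of_nonneg hk0
    have hc : (sel.length : Int) < k := by omega
    rw [mecLoop, if_pos hc]
    by_cases hL : dl < pos
    · have hjl : pos - 1 - dl < s.length := by omega
      have hleft : (pos:Int) - 1 - dl = ((pos - 1 - dl : Nat) : Int) := by omega
      have hgl : PySem.List.pyGetD s ((pos:Int) - 1 - (dl:Int)) (0,0) = s[pos-1-dl]'hjl := by
        rw [hleft, PySem.List.pyGetD_natCast, List.getD_eq_getElem]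
      have hlle : (s[pos-1-dl]'hjl).1 ≤ x := hx1 ▸ hmono _ _ hjl hpos (by omega)
      have hsndl : (s[pos-1-dl]'hjl).2 ≠ i := huniq _ hjl (by omega)
      have hdropL : (mecL x s pos).drop dl
          = (x - (s[pos-1-dl]'hjl).1) :: (mecL x s pos).drop (dl+1) := by
        rw [List.drop_eq_getElem_cons (by rw [length_mecL x s pos (le_of_lt hpos)]; exact hL)]
        rw [getElem_mecL x s pos dl (le_of_lt hpos) hL]
      have habsL : |(s[pos-1-dl]'hjl).1 - x| = x - (s[pos-1-dl]'hjl).1 := by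
        rw [abs_sub_comm]; exact abs_of_nonneg (by omega)
      have hstepL : (pos:Int) - 1 - (dl:Int) - 1 = (pos:Int) - 1 - ((dl+1 : Nat):Int) := by
        push_cast; ring
      by_cases hR : dr < s.length - (pos + 1)
      · have hjr : pos + 1 + dr < s.length := by omega
        have hright : (pos:Int) + 1 + dr = ((pos + 1 + dr : Nat) : Int) := by omega
        have hgr : PySem.List.pyGetD s ((pos:Int) + 1 + (dr:Int)) (0,0) = s[pos+1+dr]'hjr := by
          rw [hright, PySem.List.pyGetD_natCast, List.getD_eq_getElem]
        have hrge : x ≤ (s[pos+1+dr]'hjr).1 := hx1 ▸ hmono _ _ hpos hjr (by omega)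
        have hsndr : (s[pos+1+dr]'hjr).2 ≠ i := huniq _ hjr (by omega)
        have hdropR : (mecR x s pos).drop dr
            = (((s[pos+1+dr]'hjr).1 - x)) :: (mecR x s pos).drop (dr+1) := by
          rw [List.drop_eq_getElem_cons (by rw [length_mecR]; exact hR)]
          rw [getElem_mecR x s pos dr hR]
        have habsR : |(s[pos+1+dr]'hjr).1 - x| = (s[pos+1+dr]'hjr).1 - x :=
          abs_of_nonneg (by omega)
        have hstepR : (pos:Int) + 1 + (dr:Int) + 1 = (pos:Int) + 1 + ((dr+1 : Nat):Int) := by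
          push_cast; ring
        by_cases hcmp : x - (s[pos-1-dl]'hjl).1 ≤ (s[pos+1+dr]'hjr).1 - x
        · rw [if_pos ⟨by omega, Or.inr (by rw [hgl, hgr, habsL, habsR]; exact hcmp)⟩]
          rw [hgl, if_pos hsndl, hstepL]
          rw [ih (dl+1) dr (sel ++ [(s[pos-1-dl]'hjl).1]) (by omega) (by omega) (by omega)
            (by simp; omega)]
          rw [hdropL, hdropR, gm, if_pos hcmp]
          simp [abs_sub_comm x, habsL]
        · have hncond : ¬(0 ≤ (pos:Int) - 1 - (dl:Int) ∧ ((n:Int) ≤ (pos:Int) + 1 + (dr:Int) ∨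
              |(PySem.List.pyGetD s ((pos:Int) - 1 - (dl:Int)) (0,0)).1 - x| ≤
              |(PySem.List.pyGetD s ((pos:Int) + 1 + (dr:Int)) (0,0)).1 - x|)) := by
            rw [hgl, hgr, habsL, habsR]
            rintro ⟨h0, h1 | h2⟩
            · omega
            · omega
          rw [if_neg hncond]
          rw [hgr, if_pos ⟨by omega, hsndr⟩, hstepR]
          rw [ih dl (dr+1) (sel ++ [(s[pos+1+dr]'hjr).1]) (by omega) (by omega) (by omega)
            (by simp; omega)]
          rw [hdropL, hdropR, gm, if_neg (by omega)]
          simp [abs_sub_comm x, habsR]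
      · -- right exhausted: take left unconditionally
        rw [if_pos ⟨by omega, Or.inl (by omega)⟩]
        rw [hgl, if_pos hsndl, hstepL]
        rw [ih (dl+1) dr (sel ++ [(s[pos-1-dl]'hjl).1]) (by omega) (by omega) (by omega)
          (by simp; omega)]
        have hdropRnil : (mecR x s pos).drop dr = [] := by
          rw [List.drop_eq_nil_iff]; rw [length_mecR]; omega
        rw [hdropL, hdropRnil, gm]
        simp [abs_sub_comm x, habsL]
    · -- left exhausted: must take right
      have hR : dr < s.length - (pos + 1) := by omega
      have hjr : pos + 1 + dr < s.length := by omega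
      have hright : (pos:Int) + 1 + dr = ((pos + 1 + dr : Nat) : Int) := by omega
      have hgr : PySem.List.pyGetD s ((pos:Int) + 1 + (dr:Int)) (0,0) = s[pos+1+dr]'hjr := by
        rw [hright, PySem.List.pyGetD_natCast, List.getD_eq_getElem]
      have hrge : x ≤ (s[pos+1+dr]'hjr).1 := hx1 ▸ hmono _ _ hpos hjr (by omega)
      have hsndr : (s[pos+1+dr]'hjr).2 ≠ i := huniq _ hjr (by omega)
      have hdropR : (mecR x s pos).drop dr
          = (((s[pos+1+dr]'hjr).1 - x)) :: (mecR x s pos).drop (dr+1) := by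
        rw [List.drop_eq_getElem_cons (by rw [length_mecR]; exact hR)]
        rw [getElem_mecR x s pos dr hR]
      have habsR : |(s[pos+1+dr]'hjr).1 - x| = (s[pos+1+dr]'hjr).1 - x :=
        abs_of_nonneg (by omega)
      have hstepR : (pos:Int) + 1 + (dr:Int) + 1 = (pos:Int) + 1 + ((dr+1 : Nat):Int) := by
        push_cast; ring
      rw [if_neg (by rintro ⟨h0, -⟩; omega)]
      rw [hgr, if_pos ⟨by omega, hsndr⟩, hstepR]
      rw [ih dl (dr+1) (sel ++ [(s[pos+1+dr]'hjr).1]) (by omega) (by omega) (by omega)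
        (by simp; omega)]
      have hdropLnil : (mecL x s pos).drop dl = [] := by
        rw [List.drop_eq_nil_iff, length_mecL x s pos (le_of_lt hpos)]; omega
      rw [hdropLnil, hdropR, gm]
      simp [abs_sub_comm x, habsR]

theorem pairs_getElem (a : List Int) (j : Nat) (hj : j < a.length) :
    ((a.zipIdx.map (fun p => (p.1, (p.2 : Int))))[j]'(by simpa using hj)) = (a[j]'hj, (j : Int)) := by
  simp [List.getElem_zipIdx]

theorem elem_eq (k : Int) (a : List Int) (i : Int)
    (hi0 : 0 ≤ i) (hilt : i < (a.length : Int)) (hk0 : 0 ≤ k) (hklt : k < (a.length : Int)) :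
    ((mecLoop k (a.length : Int) i (PySem.List.pyGetD a i 0)
        (PySem.List.sorted2 (a.zipIdx.map (fun p => (p.1, (p.2 : Int)))) (fun p => p.1) (fun p => p.2) false)
        (k.toNat + 1)
        ((List.findIdx (fun p => p.2 == i)
          (PySem.List.sorted2 (a.zipIdx.map (fun p => (p.1, (p.2 : Int)))) (fun p => p.1) (fun p => p.2) false) : Int) - 1)
        ((List.findIdx (fun p => p.2 == i)
          (PySem.List.sorted2 (a.zipIdx.map (fun p => (p.1, (p.2 : Int)))) (fun p => p.1) (fun p => p.2) false) : Int) + 1)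
        []).map (fun v => |PySem.List.pyGetD a i 0 - v|)).sum
    = (PySem.List.slice (PySem.List.sorted
        (((PySem.List.pyRange 0 (a.length : Int)).filter (fun j => j ≠ i)).map
          (fun j => |PySem.List.pyGetD a i 0 - PySem.List.pyGetD a j 0|)) (fun x => x) false)
        none (some k)).sum := by
  set x := PySem.List.pyGetD a i 0 with hxdef
  set pairs := a.zipIdx.map (fun p => (p.1, (p.2 : Int))) with hpairsdef
  set s := PySem.List.sorted2 pairs (fun p => p.1) (fun p => p.2) false with hsdef
  set pos := List.findIdx (fun p => p.2 == i) s with hposdef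
  have hplen : pairs.length = a.length := by simp [hpairsdef]
  have hsperm : s.Perm pairs := PySem.List.sorted2_perm pairs _ _ false
  have hslen : s.length = a.length := by rw [hsperm.length_eq, hplen]
  have hx : x = a[i.toNat]'(by omega) := by
    rw [hxdef, PySem.List.pyGetD_eq_getElem a 0 hi0 (by omega)]
  -- order of s
  have hpw : s.Pairwise (fun p q => p.1 ≤ q.1) := sorted2_pairwise_fst pairs
  have hmono : ∀ p q (hp : p < s.length) (hq : q < s.length), p ≤ q → (s[p]'hp).1 ≤ (s[q]'hq).1 := by
    intro p q hp hq hpq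
    rcases Nat.lt_or_ge p q with h | h
    · exact (List.pairwise_iff_getElem.mp hpw) p q hp hq h
    · have : p = q := by omega
      subst this; exact le_refl _
  -- distinct second components
  have hnodup : (s.map (fun p => p.2)).Nodup := by
    have h1 : (pairs.map (fun p => p.2)).Nodup := by
      rw [List.nodup_iff_injective_getElem]
      intro ⟨u, hu⟩ ⟨v, hv⟩ huv
      simp only [List.length_map] at hu hv
      simp only [List.getElem_map] at huv
      rw [hplen] at hu hv
      rw [pairs_getElem a u hu, pairs_getElem a v hv] at huv
      simp only [] at huv
      apply Fin.ext
      simpa using (by exact_mod_cast huv : u = v)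
    exact ((hsperm.map (fun p => p.2)).nodup_iff).mpr h1
  -- pos facts
  have hmem : ((a[i.toNat]'(by omega), (i : Int)) : Int × Int) ∈ s := by
    rw [hsperm.mem_iff]
    have : pairs[i.toNat]'(by omega) = (a[i.toNat]'(by omega), ((i.toNat : Nat) : Int)) :=
      pairs_getElem a i.toNat (by omega)
    rw [List.mem_iff_getElem]
    exact ⟨i.toNat, by omega, by rw [this]; congr 1; omega⟩
  have hposlt : pos < s.length := by
    rw [hposdef]
    rw [List.findIdx_lt_length]
    exact ⟨_, hmem, by simp⟩
  have hsnd : (s[pos]'hposlt).2 = i := by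
    have := @List.findIdx_getElem _ (fun p => p.2 == i) s (hposdef ▸ hposlt)
    simpa [hposdef] using this
  have hmemc : ∀ p : Int × Int, p ∈ s → p = (a.getD p.2.toNat 0, p.2) ∧ 0 ≤ p.2 ∧ p.2 < (a.length : Int) := by
    intro p hp
    rw [hsperm.mem_iff, List.mem_iff_getElem] at hp
    obtain ⟨j, hj, hje⟩ := hp
    rw [hplen] at hj
    rw [pairs_getElem a j hj] at hje
    subst hje
    refine ⟨?_, by omega, by omega⟩
    have : ((j : Int)).toNat = j := by omega
    rw [this, List.getD_eq_getElem a 0 hj]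
  have hfst : (s[pos]'hposlt).1 = x := by
    obtain ⟨he, h0, hlt⟩ := hmemc _ (List.getElem_mem hposlt)
    rw [hx]
    conv_lhs => rw [he]
    simp only [hsnd]
    exact List.getD_eq_getElem a 0 (by omega)
  have huniq : ∀ j (hj : j < s.length), j ≠ pos → (s[j]'hj).2 ≠ i := by
    intro j hj hne hcon
    apply hne
    have : (s.map (fun p => p.2))[j]'(by simpa using hj) = (s.map (fun p => p.2))[pos]'(by simpa using hposlt) := by
      simp only [List.getElem_map, hcon, hsnd]
    exact (hnodup.getElem_inj_iff).mp this
    -- A side: the greedy loop is take-k of the merge of the two distance lists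
  have hn' : ((s.length : Nat) : Int) = (a.length : Int) := by rw [hslen]
  have hloop := mecLoop_eq k (a.length : Int) i x s pos hn' hposlt hfst huniq hmono hk0
    k.toNat 0 0 [] (by omega) (by omega) (by omega) (by simp)
  have hzero : (pos : Int) - 1 = (pos : Int) - 1 - ((0 : Nat) : Int) := by simp
  have hone : (pos : Int) + 1 = (pos : Int) + 1 + ((0 : Nat) : Int) := by simp
  rw [hzero, hone, hloop]
  simp only [List.drop_zero, List.map_nil, List.nil_append]
  rw [gm_eq_take_merge]
  -- B side
  have hLpw : (mecL x s pos).Pairwise (· ≤ ·) := by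
    rw [List.pairwise_iff_getElem]
    intro u v hu hv huv
    rw [length_mecL x s pos (le_of_lt hposlt)] at hu hv
    rw [getElem_mecL x s pos u (le_of_lt hposlt) hu, getElem_mecL x s pos v (le_of_lt hposlt) hv]
    have := hmono (pos - 1 - v) (pos - 1 - u) (by omega) (by omega) (by omega)
    omega
  have hRpw : (mecR x s pos).Pairwise (· ≤ ·) := by
    rw [List.pairwise_iff_getElem]
    intro u v hu hv huv
    rw [length_mecR] at hu hv
    rw [getElem_mecR x s pos u hu, getElem_mecR x s pos v hv]
    have := hmono (pos + 1 + u) (pos + 1 + v) (by omega) (by omega) (by omega)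
    omega
  have hMpw : ((mecL x s pos).merge (mecR x s pos) (fun a b => decide (a ≤ b))).Pairwise
      ((· ≤ ·) : Int → Int → Prop) := List.Pairwise.merge hLpw hRpw
  have hpermM : ((mecL x s pos).merge (mecR x s pos) (fun a b => decide (a ≤ b))).Perm
      (mecL x s pos ++ mecR x s pos) := List.merge_perm_append _
  -- membership bounds in take/drop
  have htake_le : ∀ p ∈ s.take pos, p.1 ≤ x := by
    intro p hp
    rw [List.mem_iff_getElem] at hp
    obtain ⟨j, hj, hje⟩ := hp
    simp only [List.length_take] at hj
    have hj' : j < pos := by omega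
    have : (s.take pos)[j]'(by simpa [List.length_take] using hj) = s[j]'(by omega) :=
      List.getElem_take
    rw [this] at hje
    subst hje
    exact hfst ▸ hmono j pos (by omega) hposlt (by omega)
  have hdrop_ge : ∀ p ∈ s.drop (pos+1), x ≤ p.1 := by
    intro p hp
    rw [List.mem_iff_getElem] at hp
    obtain ⟨j, hj, hje⟩ := hp
    simp only [List.length_drop] at hj
    have : (s.drop (pos+1))[j]'(by simpa [List.length_drop] using hj) = s[pos+1+j]'(by omega) :=
      List.getElem_drop
    rw [this] at hje
    subst hje
    exact hfst ▸ hmono pos (pos+1+j) hposlt (by omega) (by omega)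
  have hLperm : (mecL x s pos).Perm ((s.take pos).map (fun p => |x - p.1|)) := by
    have h2 : (s.take pos).map (fun p => x - p.1) = (s.take pos).map (fun p => |x - p.1|) :=
      List.map_congr_left (fun p hp => by
        have := htake_le p hp
        rw [abs_of_nonneg (by omega)])
    have h1 : (mecL x s pos) = ((s.take pos).reverse).map (fun p => x - p.1) := rfl
    rw [h1, ← h2]
    exact List.Perm.map _ (List.reverse_perm (s.take pos))
  have hReq : (mecR x s pos) = (s.drop (pos+1)).map (fun p => |x - p.1|) :=
    List.map_congr_left (fun p hp => by
      have := hdrop_ge p hp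
      rw [abs_of_nonpos (by omega), neg_sub])
  -- middle extraction and the permutation to B's unsorted distance list
  have hsplit_s : s.Perm ((s[pos]'hposlt) :: (s.take pos ++ s.drop (pos+1))) := by
    conv_lhs => rw [← List.take_append_drop pos s, List.drop_eq_getElem_cons hposlt]
    exact List.perm_middle
  have hpe : pairs[i.toNat]'(by omega) = s[pos]'hposlt := by
    rw [pairs_getElem a i.toNat (by omega)]
    have h1 : ((i.toNat : Nat) : Int) = i := by omega
    rw [Prod.ext_iff]
    exact ⟨by rw [hfst, hx], by rw [hsnd, h1]⟩
  have hsplit_p : pairs.Perm ((s[pos]'hposlt) :: (pairs.take i.toNat ++ pairs.drop (i.toNat+1))) := by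
    conv_lhs => rw [← List.take_append_drop i.toNat pairs,
      List.drop_eq_getElem_cons (show i.toNat < pairs.length by omega)]
    exact hpe ▸ List.perm_middle
  have hmid : (s.take pos ++ s.drop (pos+1)).Perm (pairs.take i.toNat ++ pairs.drop (i.toNat+1)) :=
    ((hsplit_s.symm.trans hsperm).trans hsplit_p).cons_inv
  have hPT : (pairs.take i.toNat).map (fun p => |x - p.1|)
      = (PySem.List.pyRange 0 i).map (fun j => |x - PySem.List.pyGetD a j 0|) := by
    apply List.ext_getElem
    · simp [hplen, PySem.List.length_pyRange_one]; omega
    · intro j h1 h2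
      simp only [List.length_map, List.length_take, hplen] at h1
      have hji : j < i.toNat := by omega
      have hja : j < a.length := by omega
      simp only [List.getElem_map, List.getElem_take, PySem.List.pyRange_one, List.getElem_range]
      rw [pairs_getElem a j hja]
      have hc : (0 : Int) + ((j : Nat) : Int) = ((j : Nat) : Int) := by omega
      rw [hc, PySem.List.pyGetD_natCast, List.getD_eq_getElem a 0 hja]
  have hPD : (pairs.drop (i.toNat+1)).map (fun p => |x - p.1|)
      = (PySem.List.pyRange (i+1) (a.length : Int)).map (fun j => |x - PySem.List.pyGetD a j 0|) := by
    apply List.ext_getElem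
    · simp [hplen, PySem.List.length_pyRange_one]; omega
    · intro j h1 h2
      simp only [List.length_map, List.length_drop, hplen] at h1
      have hja : i.toNat + 1 + j < a.length := by omega
      simp only [List.getElem_map, List.getElem_drop, PySem.List.pyRange_one, List.getElem_range]
      rw [pairs_getElem a (i.toNat+1+j) hja]
      have hc : i + 1 + ((j : Nat) : Int) = ((i.toNat + 1 + j : Nat) : Int) := by omega
      rw [hc, PySem.List.pyGetD_natCast, List.getD_eq_getElem a 0 hja]
  have hFL : (PySem.List.pyRange 0 (a.length : Int)).filter (fun j => decide (j ≠ i))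
      = PySem.List.pyRange 0 i ++ PySem.List.pyRange (i+1) (a.length : Int) := by
    rw [PySem.List.pyRange_one_append 0 i (a.length : Int) hi0 (le_of_lt hilt),
      PySem.List.pyRange_one_cons hilt, List.filter_append, List.filter_cons]
    have hii : (decide (i ≠ i)) = false := by simp
    rw [hii]
    simp only [Bool.false_eq_true, if_false]
    congr 1
    · rw [List.filter_eq_self]
      intro j hj
      rw [PySem.List.mem_pyRange_one] at hj
      simp only [decide_eq_true_eq]
      omega
    · rw [List.filter_eq_self]
      intro j hj
      rw [PySem.List.mem_pyRange_one] at hj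
      simp only [decide_eq_true_eq]
      omega
  have hDs : ((mecL x s pos).merge (mecR x s pos) (fun a b => decide (a ≤ b))).Perm
      (((PySem.List.pyRange 0 (a.length : Int)).filter (fun j => decide (j ≠ i))).map
        (fun j => |x - PySem.List.pyGetD a j 0|)) := by
    refine hpermM.trans ?_
    refine (hLperm.append (by rw [hReq] : (mecR x s pos).Perm ((s.drop (pos+1)).map (fun p => |x - p.1|)))).trans ?_
    rw [← List.map_append]
    refine (hmid.map _).trans ?_
    rw [List.map_append, hPT, hPD, hFL, List.map_append]
  have hsorted_eq : PySem.List.sorted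
      (((PySem.List.pyRange 0 (a.length : Int)).filter (fun j => decide (j ≠ i))).map
        (fun j => |x - PySem.List.pyGetD a j 0|)) (fun x => x) false
      = (mecL x s pos).merge (mecR x s pos) (fun a b => decide (a ≤ b)) :=
    PySem.List.sorted_id_eq_of_perm_of_pairwise _ _ hDs hMpw
  rw [PySem.List.slice_to _ hk0]
  rw [hsorted_eq]

-- ===== VERDICT (by name: the statement is the Claim_ definition above) =====
theorem min_energy_cost_spec : Claim_equal_min_energy_cost := by
  intro n k a _ hpre
  unfold Spec_min_energy_cost
  rcases hpre with hn0 | ⟨hk0, -⟩ | ⟨hn, hk0, hkn⟩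
  · simp only [min_energy_cost, min_energy_cost_alt,
      PySem.List.pyRange_one_eq_nil hn0, List.map_nil]
  · subst hk0
    simp only [min_energy_cost, min_energy_cost_alt]
    apply List.map_congr_left
    intro i _
    rw [mecLoop]
    norm_num
    rw [PySem.List.slice_to _ (le_refl (0:Int))]
    simp
  · subst hn
    simp only [min_energy_cost, min_energy_cost_alt]
    rcases hkn with hklt | hn0
    · apply List.map_congr_left
      intro i hi
      rw [PySem.List.mem_pyRange_one] at hi
      exact elem_eq k a i hi.1 hi.2 hk0 hklt
    · rw [hn0]
      simp
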